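-- pv_equiv track=rewrite | github.com/stamanousTis/cs-249 | week-1/replication_origin_find_helpers.py | skew_min_index
-- ===== SOURCE A (Python) =====
-- def skew(Text):
--     skewness = 0
--     skew_lst = []
--     for i in range(0, len(Text)):
--         if i == 0:
--             skew_lst.append(0);
--         if (Text[i] == "G"):
--             skewness = skewness + 1
--         elif (Text[i]=='C'):
--             skewness = skewness - 1
--         else:
--             skewness = skewness + 0
--
--         skew_lst.append(skewness)
--     return skew_lst
--
-- def skew_min_index(Text):
--     skew_vec = skew(Text)
--     skew_min = min(skew_vec)
--     skew_min_index = []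
--     for i in range(len(skew_vec)):
--         if skew_vec[i] == skew_min:
--             skew_min_index.append(i)
--         else:
--             continue
--     return skew_min_index
-- ===== SOURCE B (Python) =====
-- def skew_min_index(Text):
--     skewness = 0
--     best = 0
--     result = [0]
--     for i, c in enumerate(Text):
--         if c == 'G':
--             skewness += 1
--         elif c == 'C':
--             skewness -= 1
--         if skewness < best:
--             best = skewness
--             result = [i + 1]
--         elif skewness == best:
--             result.append(i + 1)
--     return result
-- ===== Notes on version B (the rewrite author's own statement) =====
-- stated objective: faster
-- what changed: Single pass over Text maintaining running skew, current minimum and index list, instead of materialising the full skew array and scanning it twice (once for min, once for indices).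
import Mathlib
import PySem

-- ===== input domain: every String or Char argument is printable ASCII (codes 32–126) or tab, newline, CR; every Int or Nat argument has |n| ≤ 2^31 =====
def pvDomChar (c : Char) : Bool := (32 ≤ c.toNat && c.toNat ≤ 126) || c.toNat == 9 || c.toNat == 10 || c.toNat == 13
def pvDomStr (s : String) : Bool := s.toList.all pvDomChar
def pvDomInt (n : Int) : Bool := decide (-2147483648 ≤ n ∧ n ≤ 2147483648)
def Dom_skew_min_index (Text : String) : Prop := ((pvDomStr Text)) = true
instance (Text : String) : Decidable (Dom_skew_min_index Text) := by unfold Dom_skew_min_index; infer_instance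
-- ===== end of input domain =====

-- B replaces A's build-skew-array-then-scan-twice scheme by a single pass keeping a running
-- skew, the current minimum and the index list (objective: faster by a constant factor).


-- ===== PORT A =====
-- helper `skew` of A: loop over range(len(Text)), seeding 0 at i == 0, indexing Text[i]
def skewA (Text : String) : Int × List Int :=
  (PySem.List.pyRange 0 (Text.toList.length) 1).foldl
    (fun (st : Int × List Int) i =>
      ((if PySem.List.pyGetD Text.toList i ' ' == 'G' then st.1 + 1
        else if PySem.List.pyGetD Text.toList i ' ' == 'C' then st.1 - 1 else st.1),
       (if i == 0 then st.2 ++ [(0 : Int)] else st.2) ++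
        [if PySem.List.pyGetD Text.toList i ' ' == 'G' then st.1 + 1
         else if PySem.List.pyGetD Text.toList i ' ' == 'C' then st.1 - 1 else st.1]))
    (0, [])

def skew_min_index (Text : String) : List Int :=
  let skew_vec := (skewA Text).2
  -- min(skew_vec): raises ValueError on empty skew_vec (excluded by Pre_); `.getD 0` unreached there
  let skew_min := (PySem.List.min? skew_vec (fun x => x)).getD 0
  (PySem.List.pyRange 0 (skew_vec.length) 1).foldl
    (fun acc i => if PySem.List.pyGetD skew_vec i 0 == skew_min then acc ++ [i] else acc) []

-- ===== PORT B =====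
def skew_min_index_alt (Text : String) : List Int :=
  ((PySem.List.enumerate Text.toList 0).foldl
    (fun (st : Int × Int × List Int) ic =>
      let skewness := if ic.2 == 'G' then st.1 + 1 else if ic.2 == 'C' then st.1 - 1 else st.1
      if skewness < st.2.1 then (skewness, skewness, [ic.1 + 1])
      else if skewness == st.2.1 then (skewness, st.2.1, st.2.2 ++ [ic.1 + 1])
      else (skewness, st.2.1, st.2.2))
    (0, 0, [0])).2.2

-- ===== PRECONDITION & SPEC =====
-- Pre_ excludes only the empty string, on which A's `min([])` raises ValueError.
def Pre_skew_min_index (Text : String) : Prop := Text ≠ ""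
instance (Text : String) : Decidable (Pre_skew_min_index Text) := by unfold Pre_skew_min_index; infer_instance
def pvWitness_skew_min_index : String := "GAGCC"

def Spec_skew_min_index (Text : String) (out : List Int) : Prop := out = skew_min_index_alt Text
instance (Text : String) (out : List Int) : Decidable (Spec_skew_min_index Text out) := by unfold Spec_skew_min_index; infer_instance

-- ===== CLAIM (what is proved, stated in full; the proofs are below) =====
def Claim_equal_skew_min_index : Prop := ∀ (Text : String), Dom_skew_min_index Text → Pre_skew_min_index Text → Spec_skew_min_index Text (skew_min_index Text)
-- ===== LEMMAS AND PROOFS =====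

-- skew increment of one character
def pvDelta (c : Char) (s : Int) : Int := if c == 'G' then s + 1 else if c == 'C' then s - 1 else s

-- list of running skews after each character, starting from s
def pvScan (s : Int) : List Char → List Int
  | [] => []
  | c :: t => pvDelta c s :: pvScan (pvDelta c s) t

theorem pvScan_foldl (g : Int × List Int → Char → Int × List Int)
    (hg : ∀ st c, g st c = (pvDelta c st.1, st.2 ++ [pvDelta c st.1]))
    (l : List Char) : ∀ s lst, l.foldl g (s, lst) =
      (l.foldl (fun a c => pvDelta c a) s, lst ++ pvScan s l) := by
  induction l with
  | nil => simp [pvScan]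
  | cons c t ih => intro s lst; simp [List.foldl_cons, hg, ih, pvScan]

theorem foldl_min_le (t : List Int) : ∀ b, t.foldl min b ≤ b := by
  induction t with
  | nil => simp
  | cons x w ih => intro b; exact le_trans (ih _) (min_le_left _ _)

-- the single-pass fold of B, named so the invariant can be stated about it
def pvStepB (st : Int × Int × List Int) (ic : Int × Char) : Int × Int × List Int :=
  let skewness := if ic.2 == 'G' then st.1 + 1 else if ic.2 == 'C' then st.1 - 1 else st.1
  if skewness < st.2.1 then (skewness, skewness, [ic.1 + 1])
  else if skewness == st.2.1 then (skewness, st.2.1, st.2.2 ++ [ic.1 + 1])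
  else (skewness, st.2.1, st.2.2)

-- invariant of B's single pass: it produces exactly the min-index list of the future skews
theorem pvB_invariant (l : List Char) : ∀ (s best : Int) (r : List Int) (k : Int),
    ((PySem.List.enumerate l k).foldl pvStepB (s, best, r)).2.2 =
      (if (pvScan s l).foldl min best < best then [] else r) ++
        ((PySem.List.enumerate (pvScan s l) (k + 1)).filter
          (fun p => p.2 == (pvScan s l).foldl min best)).map (·.1) := by
  induction l with
  | nil => intro s best r k; simp [PySem.List.enumerate_nil, pvScan]
  | cons c t ih =>
    intro s best r k
    rw [PySem.List.enumerate_cons, List.foldl_cons]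
    have hstep : pvStepB (s, best, r) (k, c) =
        if pvDelta c s < best then (pvDelta c s, pvDelta c s, [k + 1])
        else if pvDelta c s == best then (pvDelta c s, best, r ++ [k + 1])
        else (pvDelta c s, best, r) := by
      simp [pvStepB, pvDelta]
    rw [hstep]
    by_cases h1 : pvDelta c s < best
    · simp only [if_pos h1, ih]
      have heq : (pvScan s (c :: t)).foldl min best = (pvScan (pvDelta c s) t).foldl min (pvDelta c s) := by
        show List.foldl min best (pvScan s (c :: t)) = _
        simp only [pvScan, List.foldl_cons]; congr 1; omega
      set m := (pvScan (pvDelta c s) t).foldl min (pvDelta c s) with hm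
      have hmle : m ≤ pvDelta c s := foldl_min_le _ _
      have hMb : m < best := by omega
      rw [heq, if_pos hMb]
      simp only [pvScan, PySem.List.enumerate_cons, List.filter_cons]
      by_cases h2 : m < pvDelta c s
      · have : (pvDelta c s == m) = false := by simp; omega
        simp [this, h2]
      · have hEq : pvDelta c s = m := le_antisymm (by omega) hmle
        have : (pvDelta c s == m) = true := by simp [hEq]
        simp [this, h2]
    · have heq : (pvScan s (c :: t)).foldl min best = (pvScan (pvDelta c s) t).foldl min best := by
        show List.foldl min best (pvScan s (c :: t)) = _
        simp only [pvScan, List.foldl_cons]; congr 1; omega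
      by_cases h2 : pvDelta c s = best
      · have hb : (pvDelta c s == best) = true := by simp [h2]
        simp only [if_neg h1, hb, if_true, ih]
        set m := (pvScan (pvDelta c s) t).foldl min best with hm
        have hmle : m ≤ best := foldl_min_le _ _
        rw [heq]
        simp only [pvScan, PySem.List.enumerate_cons, List.filter_cons]
        by_cases h3 : m < best
        · rw [if_pos h3, if_pos h3]
          have : (pvDelta c s == m) = false := by simp; omega
          simp [this]
        · rw [if_neg h3, if_neg h3]
          have hEq : pvDelta c s = m := by omega
          have : (pvDelta c s == m) = true := by simp [hEq]
          simp [this]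
      · have hb : (pvDelta c s == best) = false := by simp [h2]
        simp only [if_neg h1, hb, ih]
        set m := (pvScan (pvDelta c s) t).foldl min best with hm
        have hmle : m ≤ best := foldl_min_le _ _
        rw [heq]
        simp only [pvScan, PySem.List.enumerate_cons, List.filter_cons]
        have : (pvDelta c s == m) = false := by simp; omega
        simp only [this, Bool.false_eq_true, if_false]
        rw [← hm]

-- A-side step on a character (the body of A's loop after the i == 0 seeding)
def pvStepA (st : Int × List Int) (ch : Char) : Int × List Int :=
  (pvDelta ch st.1, st.2 ++ [pvDelta ch st.1])

-- A's helper skew builds the 0-seeded running-skew list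
theorem skewA_eq (Text : String) (c : Char) (t : List Char) (hxs : Text.toList = c :: t) :
    (skewA Text).2 = 0 :: pvScan 0 (c :: t) := by
  unfold skewA
  rw [hxs]
  have hlen : (0 : Int) < ((c :: t : List Char).length : Int) := by
    have : 0 < (c :: t : List Char).length := Nat.succ_pos _
    exact_mod_cast this
  rw [PySem.List.pyRange_one_cons hlen, List.foldl_cons]
  set f := fun (st : Int × List Int) (i : Int) =>
      ((if PySem.List.pyGetD (c :: t) i ' ' == 'G' then st.1 + 1
        else if PySem.List.pyGetD (c :: t) i ' ' == 'C' then st.1 - 1 else st.1),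
       (if i == 0 then st.2 ++ [(0 : Int)] else st.2) ++
        [if PySem.List.pyGetD (c :: t) i ' ' == 'G' then st.1 + 1
         else if PySem.List.pyGetD (c :: t) i ' ' == 'C' then st.1 - 1 else st.1]) with hf
  have hstep0 : f (0, []) 0 = (pvDelta c 0, [0, pvDelta c 0]) := by
    simp [hf, PySem.List.pyGetD_zero_cons, pvDelta]
  have hcongr : (PySem.List.pyRange (0 + 1) ((c :: t : List Char).length : Int) 1).foldl
        f (f (0, []) 0) =
      (PySem.List.pyRange (0 + 1) ((c :: t : List Char).length : Int) 1).foldl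
        (fun st i => pvStepA st (PySem.List.pyGetD (c :: t) i ' ')) (f (0, []) 0) := by
    apply PySem.List.foldl_congr_mem
    intro acc i hi
    have hi1 : (0 : Int) + 1 ≤ i := (PySem.List.mem_pyRange_one.1 hi).1
    have hz : (i == 0) = false := by simp; omega
    simp [hf, pvStepA, pvDelta]
    omega
  rw [hcongr, hstep0]
  have h01 : (0 : Int) + 1 = 1 := by norm_num
  rw [h01]
  rw [PySem.List.foldl_pyRange_pyGetD' (xs := (c :: t : List Char)) (d := ' ')
    (f := pvStepA) (init := (pvDelta c 0, [0, pvDelta c 0])) (a := 1) (by norm_num)]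
  simp only [Int.toNat_one, List.drop_one, List.tail_cons]
  rw [pvScan_foldl pvStepA (fun st ch => rfl) t]
  simp [pvScan]

-- ===== VERDICT (by name: the statement is the Claim_ definition above) =====
theorem skew_min_index_spec : Claim_equal_skew_min_index := by
  intro Text _ hpre
  unfold Spec_skew_min_index
  obtain ⟨c, t, hxs⟩ : ∃ c t, Text.toList = c :: t := by
    cases h : Text.toList with
    | nil =>
      exact absurd (String.toList_eq_nil_iff.mp h) hpre
    | cons c t => exact ⟨c, t, rfl⟩
  set w := pvScan 0 (c :: t) with hw
  set M := w.foldl min 0 with hM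
  have hvec : (skewA Text).2 = 0 :: w := skewA_eq Text c t hxs
  -- A's value
  have hmin : (PySem.List.min? ((skewA Text).2) (fun x => x)).getD 0 = M := by
    rw [hvec, PySem.List.min?_id_cons]; rfl
  have hA : skew_min_index Text =
      ((PySem.List.enumerate (0 :: w) 0).filter (fun p => p.2 == M)).map (·.1) := by
    show (PySem.List.pyRange 0 (((skewA Text).2).length : Int) 1).foldl
        (fun acc i => if PySem.List.pyGetD ((skewA Text).2) i 0 ==
          (PySem.List.min? ((skewA Text).2) (fun x => x)).getD 0 then acc ++ [i] else acc) [] = _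
    rw [PySem.List.foldl_append_if_eq_filter, hmin, hvec]
    rw [PySem.List.enumerate_eq_map_pyRange (d := 0)]
    rw [List.filter_map, List.map_map]
    simp [Function.comp_def]
  -- B's value
  have hB : skew_min_index_alt Text =
      (if M < 0 then [] else [(0 : Int)]) ++
        ((PySem.List.enumerate w 1).filter (fun p => p.2 == M)).map (·.1) := by
    show ((PySem.List.enumerate Text.toList 0).foldl pvStepB (0, 0, [0])).2.2 = _
    rw [hxs, pvB_invariant]
    norm_num [← hw, ← hM]
  rw [hA, hB, PySem.List.enumerate_cons, List.filter_cons]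
  have hMle : M ≤ 0 := foldl_min_le _ _
  by_cases hM0 : M < 0
  · have : ((0 : Int) == M) = false := by simp; omega
    simp [this, hM0]
  · have : ((0 : Int) == M) = true := by simp; omega
    simp [this, hM0]
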